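-- pv_equiv track=rewrite | github.com/leihchen/leetcode | mac/2022/Schlumberger.py | alternatingPremutation
-- ===== SOURCE A (Python) =====
-- def alternatingPremutation(n):
--     res = []
--     def bt(tmp, parity, check_parity=True):
--         if len(tmp) == n:
--             res.append(list(tmp))
--         for i in range(1, n+1):  # output should be sorted in lex
--             if i in tmp or (i % 2 == parity and check_parity): continue
--             tmp.append(i)
--             bt(tmp, i % 2)
--             tmp.pop()
--     bt([], 0, False)
--     return res
-- ===== SOURCE B (Python) =====
-- def alternatingPremutation(n):
--     # iterative level-wise (BFS) construction instead of recursive backtracking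
--     chains = [[]]
--     for _ in range(n):
--         chains = [c + [i] for c in chains for i in range(1, n + 1)
--                   if i not in c and (not c or (c[-1] - i) % 2 == 1)]
--     return [c for c in chains if len(c) == n]
-- ===== Notes on version B (the rewrite author's own statement) =====
-- stated objective: simpler
-- what changed: Replaces A's recursive backtracking (mutable shared list, parity/check_parity parameters, append/pop) by an iterative breadth-first construction: a comprehension extends every partial chain by one valid element per round, n rounds total, then keeps the full-length chains.
import Mathlib
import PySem

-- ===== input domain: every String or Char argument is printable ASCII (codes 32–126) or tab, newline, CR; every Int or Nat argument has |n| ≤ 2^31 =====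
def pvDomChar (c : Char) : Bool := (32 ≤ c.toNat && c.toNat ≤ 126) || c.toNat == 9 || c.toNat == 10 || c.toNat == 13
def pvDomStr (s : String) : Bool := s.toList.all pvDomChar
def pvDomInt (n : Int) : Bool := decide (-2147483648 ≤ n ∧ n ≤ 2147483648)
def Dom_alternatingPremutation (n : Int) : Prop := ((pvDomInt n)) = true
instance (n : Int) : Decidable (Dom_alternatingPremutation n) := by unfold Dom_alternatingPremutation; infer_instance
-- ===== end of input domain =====

-- B replaces A's recursive backtracking (mutable tmp, parity parameter) by an iterative
-- level-wise (BFS) construction with comprehensions; objective: simpler, same output order.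

-- ===== PORT A =====
-- Literal transliteration of A's nested recursive `bt`; the Nat fuel only makes the
-- recursion total (depth is at most n.toNat+1, so fuel never runs out on any input).
def btA (n : Int) : Nat → List Int → Int → Bool → List (List Int) → List (List Int)
  | 0, _, _, _, res => res
  | fuel+1, tmp, parity, cp, res =>
    let res1 := if (tmp.length : Int) = n then res ++ [tmp] else res
    (PySem.List.pyRange 1 (n+1) 1).foldl
      (fun r i =>
        if tmp.contains i || (i % 2 == parity && cp) then r
        else btA n fuel (tmp ++ [i]) (i % 2) true r) res1

def alternatingPremutation (n : Int) : List (List Int) :=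
  btA n (n.toNat + 1) [] 0 false []

-- ===== PORT B =====
-- condition of B's comprehension: `i not in c and (not c or (c[-1] - i) % 2 == 1)`
def okB (c : List Int) (i : Int) : Bool :=
  !c.contains i && (c.isEmpty || (((PySem.List.pyGet? c (-1)).getD 0 - i) % 2 == 1))

-- one round of `chains = [c + [i] for c in chains for i in range(1, n+1) if …]`
def stepB (n : Int) (chains : List (List Int)) : List (List Int) :=
  chains.flatMap (fun c => ((PySem.List.pyRange 1 (n+1) 1).filter (okB c)).map (fun i => c ++ [i]))

def alternatingPremutation_alt (n : Int) : List (List Int) :=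
  ((List.range n.toNat).foldl (fun chains _ => stepB n chains) [[]]).filter
    (fun c => (c.length : Int) == n)

-- ===== PRECONDITION & SPEC =====
def Spec_alternatingPremutation (n : Int) (out : List (List Int)) : Prop := out = alternatingPremutation_alt n
instance (n : Int) (out : List (List Int)) : Decidable (Spec_alternatingPremutation n out) := by unfold Spec_alternatingPremutation; infer_instance

-- ===== CLAIM (what is proved, stated in full; the proofs are below) =====
def Claim_equal_alternatingPremutation : Prop := ∀ (n : Int), Dom_alternatingPremutation n → Spec_alternatingPremutation n (alternatingPremutation n)

-- ===== LEMMAS AND PROOFS =====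

-- A's bt without the accumulator
def btD (n : Int) : Nat → List Int → Int → Bool → List (List Int)
  | 0, _, _, _ => []
  | fuel+1, tmp, parity, cp =>
    (if (tmp.length : Int) = n then [tmp] else []) ++
    (PySem.List.pyRange 1 (n+1) 1).flatMap
      (fun i =>
        if tmp.contains i || (i % 2 == parity && cp) then []
        else btD n fuel (tmp ++ [i]) (i % 2) true)

-- DFS completions phrased with B's condition
def ED (n : Int) : Nat → List Int → List (List Int)
  | 0, _ => []
  | fuel+1, c =>
    (if (c.length : Int) = n then [c] else []) ++
    (PySem.List.pyRange 1 (n+1) 1).flatMap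
      (fun i => if okB c i then ED n fuel (c ++ [i]) else [])

-- iterated stepB
def stepN (n : Int) : Nat → List (List Int) → List (List Int)
  | 0, chains => chains
  | m+1, chains => stepN n m (stepB n chains)

lemma foldl_append_of_append (f : List (List Int) → Int → List (List Int))
    (g : Int → List (List Int)) (h : ∀ r i, f r i = r ++ g i) :
    ∀ (l : List Int) (r : List (List Int)), l.foldl f r = r ++ l.flatMap g := by
  intro l
  induction l with
  | nil => simp
  | cons x xs ih => intro r; simp [List.foldl_cons, h, ih]

lemma btA_eq_btD (n : Int) :
    ∀ fuel tmp parity cp res, btA n fuel tmp parity cp res = res ++ btD n fuel tmp parity cp := by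
  intro fuel
  induction fuel with
  | zero => intro tmp parity cp res; simp [btA, btD]
  | succ m ih =>
    intro tmp parity cp res
    show ((PySem.List.pyRange 1 (n+1) 1).foldl _ _) = _
    rw [foldl_append_of_append _
      (fun i => if tmp.contains i || (i % 2 == parity && cp) then []
                else btD n m (tmp ++ [i]) (i % 2) true)
      (by intro r i
          split
          · next hB => simp only [if_pos hB, List.append_nil]
          · next hB => simp only [if_neg hB]; exact ih _ _ _ _)]
    show (if (tmp.length : Int) = n then res ++ [tmp] else res) ++ _ = _
    by_cases h : (tmp.length : Int) = n <;> simp [btD, h]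

lemma okB_of_ne_nil (c : List Int) (i : Int) (h : c ≠ []) :
    okB c i = !(c.contains i || (i % 2 == (c.getLast?.getD 0) % 2 && true)) := by
  unfold okB
  rw [PySem.List.pyGet?_neg_one]
  by_cases hm : i ∈ c
  · simp [hm]
  · have he : c.isEmpty = false := by simpa using h
    by_cases hp : i % 2 = (c.getLast?.getD 0) % 2
    · have h2 : (c.getLast?.getD 0 - i) % 2 = 0 := by omega
      simp [hm, he, h2, hp]
    · have h2 : (c.getLast?.getD 0 - i) % 2 = 1 := by omega
      simp [hm, he, h2, hp]

lemma btD_eq_ED_ne (n : Int) :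
    ∀ fuel (c : List Int), c ≠ [] → btD n fuel c ((c.getLast?.getD 0) % 2) true = ED n fuel c := by
  intro fuel
  induction fuel with
  | zero => intro c _; simp [btD, ED]
  | succ m ih =>
    intro c hc
    unfold btD ED
    congr 1
    apply List.flatMap_congr
    intro i _
    rw [okB_of_ne_nil c i hc]
    by_cases hcond : (c.contains i || (i % 2 == (c.getLast?.getD 0) % 2 && true)) = true
    · rw [if_pos hcond, hcond]
      simp
    · rw [if_neg hcond]
      have hok : (!(c.contains i || (i % 2 == (c.getLast?.getD 0) % 2 && true))) = true := by
        simp_all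
      rw [if_pos hok]
      have hlast : ((c ++ [i]).getLast?.getD 0) = i := by simp
      have := ih (c ++ [i]) (by simp)
      rw [hlast] at this
      exact this

lemma btD_eq_ED_nil (n : Int) :
    ∀ fuel, btD n fuel [] 0 false = ED n fuel [] := by
  intro fuel
  cases fuel with
  | zero => simp [btD, ED]
  | succ m =>
    unfold btD ED
    congr 1
    apply List.flatMap_congr
    intro i _
    have hok : okB [] i = true := by simp [okB]
    have hcond : (([] : List Int).contains i || (i % 2 == 0 && false)) = false := by simp
    rw [hok, hcond]
    simp only [Bool.false_eq_true, if_false]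
    have := btD_eq_ED_ne n m ([] ++ [i]) (by simp)
    simpa using this

lemma stepN_flatMap (n : Int) :
    ∀ m (xs : List (List Int)), stepN n m xs = xs.flatMap (fun c => stepN n m [c]) := by
  intro m
  induction m with
  | zero => intro xs; simp [stepN]
  | succ k ih =>
    intro xs
    show stepN n k (stepB n xs) = _
    have h1 : stepB n xs = xs.flatMap (fun c => stepB n [c]) := by
      simp [stepB]
    rw [h1, ih, List.flatMap_assoc]
    apply List.flatMap_congr
    intro c _
    exact (ih (stepB n [c])).symm

lemma flatMap_ite_filter (p : Int → Bool) (f : Int → List (List Int)) :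
    ∀ (l : List Int), l.flatMap (fun i => if p i then f i else []) = (l.filter p).flatMap f := by
  intro l
  induction l with
  | nil => simp
  | cons x xs ih => by_cases h : p x <;> simp [h, ih]

lemma ED_eq_stepN (n : Int) :
    ∀ (m : Nat) (c : List Int), (c.length : Int) + (m : Int) = n →
      ED n (m+1) c = (stepN n m [c]).filter (fun d => (d.length : Int) == n) := by
  intro m
  induction m with
  | zero =>
    intro c h
    simp only [Nat.cast_zero, add_zero] at h
    simp [ED, stepN, h]
  | succ k ih =>
    intro c h
    have hne : ¬ ((c.length : Int) = n) := by push_cast at h ⊢; omega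
    show (if (c.length : Int) = n then [c] else []) ++ _ = _
    rw [if_neg hne]
    simp only [List.nil_append]
    calc (PySem.List.pyRange 1 (n+1) 1).flatMap
          (fun i => if okB c i then ED n (k+1) (c ++ [i]) else [])
        = (PySem.List.pyRange 1 (n+1) 1).flatMap
          (fun i => if okB c i then (stepN n k [c ++ [i]]).filter (fun d => (d.length : Int) == n) else []) := by
          apply List.flatMap_congr
          intro i _
          by_cases hi : okB c i = true
          · rw [if_pos hi, if_pos hi, ih (c ++ [i]) (by push_cast at h ⊢; simp; omega)]
          · rw [if_neg hi, if_neg hi]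
      _ = ((PySem.List.pyRange 1 (n+1) 1).filter (okB c)).flatMap
          (fun i => (stepN n k [c ++ [i]]).filter (fun d => (d.length : Int) == n)) :=
          flatMap_ite_filter _ _ _
      _ = (stepN n (k+1) [c]).filter (fun d => (d.length : Int) == n) := by
          show _ = (stepN n k (stepB n [c])).filter _
          have hst : stepB n [c] = ((PySem.List.pyRange 1 (n+1) 1).filter (okB c)).map (fun i => c ++ [i]) := by
            simp [stepB]
          rw [hst, stepN_flatMap n k, List.flatMap_map, List.filter_flatMap]

lemma foldl_stepB (n : Int) :
    ∀ (l : List Nat) (chains : List (List Int)),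
      l.foldl (fun ch _ => stepB n ch) chains = stepN n l.length chains := by
  intro l
  induction l with
  | nil => intro chains; simp [stepN]
  | cons x xs ih => intro chains; simp [List.foldl_cons, ih, stepN]

-- ===== VERDICT (by name: the statement is the Claim_ definition above) =====
theorem alternatingPremutation_spec : Claim_equal_alternatingPremutation := by
  intro n _
  unfold Spec_alternatingPremutation alternatingPremutation alternatingPremutation_alt
  rw [btA_eq_btD, List.nil_append, btD_eq_ED_nil, foldl_stepB, List.length_range]
  by_cases hn : 0 ≤ n
  · have h0 : ((([] : List Int).length : Int) + ((n.toNat : Nat) : Int) = n) := by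
      simp; omega
    rw [ED_eq_stepN n n.toNat [] h0]
  · have h1 : n.toNat = 0 := by omega
    have h2 : PySem.List.pyRange 1 (n+1) 1 = [] := PySem.List.pyRange_one_eq_nil (by omega)
    have h3 : ¬ ((0 : Int) = n) := by omega
    have h4 : (((0 : Int)) == n) = false := by simp; omega
    rw [h1]
    simp [ED, stepN, h2, h3, h4]
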